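-- pv_equiv track=rewrite | github.com/tamlinlove/btcm | btcm/cfx/explainer.py | assignment_string
-- ===== SOURCE A (Python) =====
-- def assignment_string(names:dict,values:dict=None,node_names:dict[str,str]=None):
--     if values is None:
--         values = names
--     text = ""
--     val_list = list(names.keys())
--     for i in range(len(val_list)):
--         node = val_list[i]
--         if node_names is not None:
--             node_name = node_names[node]
--         else:
--             node_name = node
--         text += f"{node_name} = {values[node]}"
--         if i == len(val_list) - 1:
--             continue
--         elif i == len(val_list) - 2:
--             if len(val_list) > 2:
--                 text += ", and "
--             else:
--                 text += " and "
--         else: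
--             text += ", "
--     return text
-- ===== SOURCE B (Python) =====
-- def assignment_string(names: dict, values: dict = None, node_names: dict[str, str] = None):
--     if values is None:
--         values = names
--     parts = [
--         f"{node_names[node] if node_names is not None else node} = {values[node]}"
--         for node in names
--     ]
--     if len(parts) == 0:
--         return ""
--     if len(parts) == 1:
--         return parts[0]
--     if len(parts) == 2:
--         return f"{parts[0]} and {parts[1]}"
--     return ", ".join(parts[:-1]) + ", and " + parts[-1]
-- ===== Notes on version B (the rewrite author's own statement) =====
-- stated objective: simpler
-- what changed: Replaces the index-based loop with per-position separator tests by a two-phase build: format all pieces first, then assemble by a case split on the count (empty / one / two / join-with-', '-plus-', and ').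
import Mathlib
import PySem

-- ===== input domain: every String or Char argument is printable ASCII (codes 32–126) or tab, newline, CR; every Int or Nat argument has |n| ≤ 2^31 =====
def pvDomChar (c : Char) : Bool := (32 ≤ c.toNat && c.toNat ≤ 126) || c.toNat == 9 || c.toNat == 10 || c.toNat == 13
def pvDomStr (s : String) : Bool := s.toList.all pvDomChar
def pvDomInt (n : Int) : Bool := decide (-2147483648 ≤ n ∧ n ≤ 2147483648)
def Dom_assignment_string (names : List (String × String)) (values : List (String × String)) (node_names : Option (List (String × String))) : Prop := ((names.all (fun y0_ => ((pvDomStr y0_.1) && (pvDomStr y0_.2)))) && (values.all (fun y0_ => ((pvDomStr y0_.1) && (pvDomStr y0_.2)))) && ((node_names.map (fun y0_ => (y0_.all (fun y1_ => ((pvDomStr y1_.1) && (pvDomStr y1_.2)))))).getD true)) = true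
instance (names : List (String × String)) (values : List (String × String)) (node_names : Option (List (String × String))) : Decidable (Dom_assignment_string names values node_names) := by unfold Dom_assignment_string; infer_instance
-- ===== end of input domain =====

-- B replaces A's index-based separator loop by a build-then-join: format all pieces, then assemble by a case split on the count (objective: simpler).


-- ===== PORT A =====
-- ('values is None' never occurs under the type convention: values is always a dict here, so the
--  'values = names' defaulting line has no Lean counterpart.)
def assignment_string (names : List (String × String)) (values : List (String × String)) (node_names : Option (List (String × String))) : String :=
  let valuesD := PySem.Dict.ofList values
  let nodeNamesD := node_names.map PySem.Dict.ofList
  let val_list := (PySem.Dict.ofList names).keys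
  (PySem.List.pyRange 0 (val_list.length : Int) 1).foldl (fun text i =>
    let node := PySem.List.pyGetD val_list i ""
    let node_name := match nodeNamesD with
      | some d => d.getD node ""      -- node_names[node]; KeyError excluded by Pre_
      | none => node
    let text := text ++ node_name ++ " = " ++ valuesD.getD node ""  -- values[node]; KeyError excluded by Pre_
    if i = (val_list.length : Int) - 1 then text
    else if i = (val_list.length : Int) - 2 then
      (if (2 : Int) < (val_list.length : Int) then text ++ ", and " else text ++ " and ")
    else text ++ ", ") ""

-- ===== PORT B =====
def assignment_string_alt (names : List (String × String)) (values : List (String × String)) (node_names : Option (List (String × String))) : String :=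
  let valuesD := PySem.Dict.ofList values
  let nodeNamesD := node_names.map PySem.Dict.ofList
  let parts := (PySem.Dict.ofList names).keys.map (fun node =>
    (match nodeNamesD with
      | some d => d.getD node ""
      | none => node) ++ " = " ++ valuesD.getD node "")
  if parts.length = 0 then ""
  else if parts.length = 1 then PySem.List.pyGetD parts 0 ""
  else if parts.length = 2 then PySem.List.pyGetD parts 0 "" ++ " and " ++ PySem.List.pyGetD parts 1 ""
  else PySem.Str.join ", " (PySem.List.slice parts none (some (-1))) ++ ", and " ++ PySem.List.pyGetD parts (-1) ""

-- ===== PRECONDITION & SPEC =====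
-- Pre_ excludes exactly the inputs on which Python A raises KeyError: a key of names missing
-- from values, or (when node_names is given) missing from node_names.
def Pre_assignment_string (names : List (String × String)) (values : List (String × String)) (node_names : Option (List (String × String))) : Prop :=
  ∀ k ∈ names.map Prod.fst,
    k ∈ values.map Prod.fst ∧ (∀ nn ∈ node_names, k ∈ nn.map Prod.fst)
instance (names : List (String × String)) (values : List (String × String)) (node_names : Option (List (String × String))) : Decidable (Pre_assignment_string names values node_names) := by unfold Pre_assignment_string; infer_instance

def pvWitness_assignment_string : (List (String × String)) × (List (String × String)) × (Option (List (String × String))) :=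
  ([("a", "1"), ("b", "2"), ("c", "3")], [("a", "x"), ("b", "y"), ("c", "z")], none)

def Spec_assignment_string (names : List (String × String)) (values : List (String × String)) (node_names : Option (List (String × String))) (out : String) : Prop := out = assignment_string_alt names values node_names
instance (names : List (String × String)) (values : List (String × String)) (node_names : Option (List (String × String))) (out : String) : Decidable (Spec_assignment_string names values node_names out) := by unfold Spec_assignment_string; infer_instance

-- ===== CLAIM (what is proved, stated in full; the proofs are below) =====
def Claim_equal_assignment_string : Prop := ∀ (names : List (String × String)) (values : List (String × String)) (node_names : Option (List (String × String))), Dom_assignment_string names values node_names → Pre_assignment_string names values node_names → Spec_assignment_string names values node_names (assignment_string names values node_names)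

-- ===== LEMMAS AND PROOFS =====

def pvCat (l : List String) : String := l.foldl (· ++ ·) ""
def pvSep (n k : Nat) : String :=
  if k + 1 = n then "" else if k + 2 = n then (if 2 < n then ", and " else " and ") else ", "
def pvJ (ps : List String) : String :=
  pvCat ((List.range ps.length).map (fun k => ps.getD k "" ++ pvSep ps.length k))
lemma pvFoldl_str (l : List String) (x : String) : l.foldl (· ++ ·) x = x ++ pvCat l := by
  induction l generalizing x with
  | nil => simp [pvCat, String.append_empty]
  | cons a l ih => simp only [pvCat, List.foldl_cons, ih (x ++ a), ih a, String.append_assoc, String.empty_append]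
lemma pvCat_cons (a : String) (l : List String) : pvCat (a :: l) = a ++ pvCat l := by
  show l.foldl (· ++ ·) ("" ++ a) = _
  rw [pvFoldl_str, String.empty_append]
lemma pvJ_shift (x : String) (ps : List String) (h : 3 ≤ ps.length) :
    pvJ (x :: ps) = x ++ ", " ++ pvJ ps := by
  unfold pvJ
  have hl : (x :: ps).length = ps.length + 1 := rfl
  rw [hl, List.range_succ_eq_map, List.map_cons, List.map_map, pvCat_cons]
  have h0 : (x :: ps).getD 0 "" ++ pvSep (ps.length + 1) 0 = x ++ ", " := by
    simp only [List.getD_cons_zero, pvSep]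
    split_ifs <;> first | rfl | omega
  have ht : ((fun k => (x :: ps).getD k "" ++ pvSep (ps.length + 1) k) ∘ Nat.succ)
      = (fun k => ps.getD k "" ++ pvSep ps.length k) := by
    funext k
    simp only [Function.comp, Nat.succ_eq_add_one, List.getD_cons_succ, pvSep]
    split_ifs <;> first | rfl | omega
  rw [h0, ht, String.append_assoc]

lemma pvJoin_cons_cons (a b : String) (l : List String) :
    PySem.Str.join ", " (a :: b :: l) = a ++ ", " ++ PySem.Str.join ", " (b :: l) := by
  apply String.toList_inj.mp
  simp [PySem.Chars.join_cons_cons]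

lemma pvJoin_singleton (a : String) : PySem.Str.join ", " [a] = a := by
  apply String.toList_inj.mp
  simp [PySem.Chars.join_singleton]

lemma pvJ_big (a : String) (qs : List String) (y z : String) :
    pvJ (a :: qs ++ [y, z]) = PySem.Str.join ", " (a :: qs ++ [y]) ++ ", and " ++ z := by
  induction qs generalizing a with
  | nil =>
    have h2 : PySem.Str.join ", " [a, y] = a ++ ", " ++ y := by
      rw [pvJoin_cons_cons, pvJoin_singleton]
    apply String.toList_inj.mp
    simp [pvJ, pvCat, pvSep, List.range_succ, h2]
  | cons b qs ih =>
    have hsh := pvJ_shift a ((b :: qs) ++ [y, z]) (by simp)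
    simp only [List.cons_append] at hsh ⊢
    have ihb := ih b
    simp only [List.cons_append] at ihb
    rw [hsh, ihb, pvJoin_cons_cons]
    simp [String.append_assoc]

lemma pvDecomp (rest : List String) (h : 2 ≤ rest.length) : ∃ qs y z, rest = qs ++ [y, z] := by
  rcases hr : rest.reverse with _ | ⟨z, t1⟩
  · exfalso
    have hnil : rest = [] := by simpa using congrArg List.reverse hr
    subst hnil
    simp at h
  · rcases t1 with _ | ⟨y, t2⟩
    · exfalso
      have := congrArg List.length hr
      simp at this
      omega
    · refine ⟨t2.reverse, y, z, ?_⟩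
      have hrr : rest = rest.reverse.reverse := by simp
      rw [hrr, hr]
      simp

lemma pvB_eq (ps : List String) :
    (if ps.length = 0 then ""
     else if ps.length = 1 then PySem.List.pyGetD ps 0 ""
     else if ps.length = 2 then PySem.List.pyGetD ps 0 "" ++ " and " ++ PySem.List.pyGetD ps 1 ""
     else PySem.Str.join ", " (PySem.List.slice ps none (some (-1))) ++ ", and " ++ PySem.List.pyGetD ps (-1) "") = pvJ ps := by
  split_ifs with h0 h1 h2
  · rw [List.length_eq_zero_iff.mp h0]; rfl
  · obtain ⟨p, rfl⟩ := List.length_eq_one_iff.mp h1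
    apply String.toList_inj.mp
    simp [pvJ, pvCat, pvSep, List.range_succ, PySem.List.pyGetD_zero_cons]
  · obtain ⟨p, q, rfl⟩ : ∃ p q, ps = [p, q] := by
      rcases ps with _ | ⟨p, _ | ⟨q, _ | _⟩⟩ <;> simp_all
    apply String.toList_inj.mp
    simp [pvJ, pvCat, pvSep, List.range_succ, PySem.List.pyGetD]
  · have h3 : 3 ≤ ps.length := by omega
    rcases ps with _ | ⟨a, rest⟩
    · simp at h3
    obtain ⟨qs, y, z, rfl⟩ := pvDecomp rest (by simp at h3; omega)
    have hps : a :: (qs ++ [y, z]) = (a :: (qs ++ [y])) ++ [z] := by simp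
    have hbig := pvJ_big a qs y z
    simp only [List.cons_append] at hbig
    rw [hps, PySem.List.slice_to_neg_one, List.dropLast_concat,
        PySem.List.pyGetD_neg_one_append_singleton, ← hps]
    exact hbig.symm

lemma pvFoldl_app {α : Type} (l : List α) (g : α → String) (init : String) :
    l.foldl (fun t i => t ++ g i) init = init ++ pvCat (l.map g) := by
  induction l generalizing init with
  | nil => simp [pvCat, String.append_empty]
  | cons a l ih => simp only [List.map_cons, List.foldl_cons, ih, pvCat_cons, String.append_assoc]

lemma pvA_eq (xs : List String) (F : String → String) :
    (PySem.List.pyRange 0 (xs.length : Int) 1).foldl (fun text i =>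
      text ++ F (PySem.List.pyGetD xs i "") ++
        (if i = (xs.length : Int) - 1 then ""
         else if i = (xs.length : Int) - 2 then
           (if (2 : Int) < (xs.length : Int) then ", and " else " and ")
         else ", ")) "" = pvJ (xs.map F) := by
  have hstep : (fun (text : String) (i : Int) =>
      text ++ F (PySem.List.pyGetD xs i "") ++
        (if i = (xs.length : Int) - 1 then ""
         else if i = (xs.length : Int) - 2 then
           (if (2 : Int) < (xs.length : Int) then ", and " else " and ")
         else ", "))
      = (fun text i => text ++ (F (PySem.List.pyGetD xs i "") ++
        (if i = (xs.length : Int) - 1 then ""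
         else if i = (xs.length : Int) - 2 then
           (if (2 : Int) < (xs.length : Int) then ", and " else " and ")
         else ", "))) := by
    funext t i
    rw [String.append_assoc]
  rw [hstep, pvFoldl_app, String.empty_append, PySem.List.pyRange_one, List.map_map]
  unfold pvJ
  rw [List.length_map]
  have hn : ((xs.length : Int) - 0).toNat = xs.length := by simp
  rw [hn]
  congr 1
  apply List.map_congr_left
  intro k hk
  have hk' : k < xs.length := List.mem_range.mp hk
  simp only [Function.comp]
  have e1 : PySem.List.pyGetD xs ((0 : Int) + k) "" = xs.getD k "" := by
    rw [zero_add, PySem.List.pyGetD_natCast]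
  have e2 : (xs.map F).getD k "" = F (xs.getD k "") := by
    simp [List.getD_eq_getElem?_getD, List.getElem?_map, List.getElem?_eq_getElem hk']
  rw [e1, e2]
  congr 1
  simp only [pvSep, zero_add]
  split_ifs <;> first | rfl | omega

-- ===== VERDICT (by name: the statement is the Claim_ definition above) =====
theorem assignment_string_spec : Claim_equal_assignment_string := by
  intro names values node_names _ _
  unfold Spec_assignment_string assignment_string assignment_string_alt
  dsimp only
  rw [pvB_eq]
  rw [← pvA_eq ((PySem.Dict.ofList names).keys) (fun node =>
    (match node_names.map PySem.Dict.ofList with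
      | some d => d.getD node ""
      | none => node) ++ " = " ++ (PySem.Dict.ofList values).getD node "")]
  congr 1
  funext t i
  split_ifs <;> simp [String.append_assoc, String.append_empty]
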